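-- pv_equiv track=rewrite | github.com/TioSatrio100/AlgorithmLabITMO | lab3/task2/src/task2.py | generate_worst_case
-- ===== SOURCE A (Python) =====
-- def generate_worst_case(n):
--     arr = []
--     for i in range(1, n + 1):
--         if i % 2 == 1:
--             arr.append(i)
--     for i in range(2, n + 1, 2):
--         arr.append(i)
--     return arr
-- ===== SOURCE B (Python) =====
-- def generate_worst_case(n):
--     h = (n + 1) // 2
--     return [2 * k + 1 if k < h else 2 * (k - h) + 2 for k in range(n)]
-- ===== Notes on version B (the rewrite author's own statement) =====
-- stated objective: alternative
-- what changed: Replaces A's two appending loops (a parity-filtered scan then a stepped even loop) with a single comprehension that computes each position's value directly from its index by a closed-form formula (odd values at the first ceil-half of positions, even values after), with no conditional appends or second pass.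
import Mathlib
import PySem

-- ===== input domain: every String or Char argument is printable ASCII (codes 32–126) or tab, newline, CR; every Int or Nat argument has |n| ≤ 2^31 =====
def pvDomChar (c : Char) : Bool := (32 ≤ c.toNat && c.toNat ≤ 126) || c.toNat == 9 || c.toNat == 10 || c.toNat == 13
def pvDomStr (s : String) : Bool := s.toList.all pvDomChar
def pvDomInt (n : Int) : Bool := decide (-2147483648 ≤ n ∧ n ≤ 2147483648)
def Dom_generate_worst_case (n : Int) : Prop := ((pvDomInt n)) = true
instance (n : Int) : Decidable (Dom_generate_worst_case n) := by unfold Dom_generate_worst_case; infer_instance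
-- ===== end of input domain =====

-- B replaces A's two appending loops with a single comprehension computing each position's value from its index by a closed-form formula; alternative decomposition, same cost.

-- ===== PORT A =====
-- A: first loop appends odd i from range(1, n+1); second loop appends i from range(2, n+1, 2).
def generate_worst_case (n : Int) : List Int :=
  (PySem.List.pyRange 2 (n + 1) 2).foldl (fun arr i => arr ++ [i])
    ((PySem.List.pyRange 1 (n + 1) 1).foldl
      (fun arr i => if PySem.Int.mod i 2 == 1 then arr ++ [i] else arr) ([] : List Int))

-- ===== PORT B =====
-- B: h = (n + 1) // 2; [2*k+1 if k < h else 2*(k-h)+2 for k in range(n)].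
def generate_worst_case_alt (n : Int) : List Int :=
  let h := PySem.Int.floordiv (n + 1) 2
  (PySem.List.pyRange 0 n 1).map (fun k => if k < h then 2 * k + 1 else 2 * (k - h) + 2)

-- ===== PRECONDITION & SPEC =====
def Spec_generate_worst_case (n : Int) (out : List Int) : Prop := out = generate_worst_case_alt n
instance (n : Int) (out : List Int) : Decidable (Spec_generate_worst_case n out) := by unfold Spec_generate_worst_case; infer_instance

-- ===== CLAIM (what is proved, stated in full; the proofs are below) =====
def Claim_equal_generate_worst_case : Prop := ∀ (n : Int), Dom_generate_worst_case n → Spec_generate_worst_case n (generate_worst_case n)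

-- ===== LEMMAS AND PROOFS =====

-- the odd test as a plain arithmetic condition
theorem pv_q_true {m : Int} (h : m % 2 = 1) : (PySem.Int.mod m 2 == 1) = true := by
  rw [PySem.Int.mod_eq_emod_of_pos (by norm_num)]
  simp [h]

theorem pv_q_false {m : Int} (h : ¬ m % 2 = 1) : (PySem.Int.mod m 2 == 1) = false := by
  rw [PySem.Int.mod_eq_emod_of_pos (by norm_num)]
  have : m % 2 = 0 := by omega
  simp [this]

-- one growth step of the stepped odd range
theorem pv_step1 (m : Int) (hm : 1 ≤ m) :
    PySem.List.pyRange 1 (m + 1) 2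
      = PySem.List.pyRange 1 m 2 ++ (if PySem.Int.mod m 2 == 1 then [m] else []) := by
  rw [PySem.List.pyRange_of_pos 1 (m + 1) (by norm_num),
      PySem.List.pyRange_of_pos 1 m (by norm_num)]
  by_cases h : m % 2 = 1
  · rw [pv_q_true h]
    have hA : (if (1:Int) < m + 1 then ((m + 1 - 1 + 2 - 1) / 2).toNat else 0)
        = (if (1:Int) < m then ((m - 1 + 2 - 1) / 2).toNat else 0) + 1 := by
      split_ifs <;> omega
    rw [hA, List.range_succ, List.map_append]
    congr 1
    simp only [List.map_cons, List.map_nil]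
    congr 1
    split_ifs <;> omega
  · rw [pv_q_false h]
    have hA : (if (1:Int) < m + 1 then ((m + 1 - 1 + 2 - 1) / 2).toNat else 0)
        = (if (1:Int) < m then ((m - 1 + 2 - 1) / 2).toNat else 0) := by
      split_ifs <;> omega
    rw [hA]
    simp

-- the stepped odd range is the odd-filtered full range
theorem pv_odds_nat (k : Nat) :
    PySem.List.pyRange 1 (1 + (k : Int)) 2
      = (PySem.List.pyRange 1 (1 + (k : Int)) 1).filter (fun i => PySem.Int.mod i 2 == 1) := by
  induction k with
  | zero =>
    rw [show (1 + ((0 : Nat) : Int)) = 1 by norm_num,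
        PySem.List.pyRange_of_pos 1 1 (by norm_num),
        PySem.List.pyRange_one_eq_nil le_rfl]
    simp
  | succ k ih =>
    have hcast : (1 + ((k + 1 : Nat)) : Int) = (1 + (k : Int)) + 1 := by push_cast; ring
    rw [hcast, pv_step1 _ (by omega),
        PySem.List.pyRange_one_succ_right (by omega : (1:Int) ≤ 1 + (k : Int)),
        List.filter_append, ih]
    congr 1
    simp only [List.filter_cons, List.filter_nil]

theorem pv_odds (m : Int) :
    PySem.List.pyRange 1 m 2
      = (PySem.List.pyRange 1 m 1).filter (fun i => PySem.Int.mod i 2 == 1) := by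
  by_cases h : m ≤ 1
  · rw [PySem.List.pyRange_one_eq_nil h, PySem.List.pyRange_of_pos 1 m (by norm_num)]
    have : ¬ (1:Int) < m := by omega
    simp [this]
  · have h : 1 < m := by omega
    have hm : m = 1 + ((m - 1).toNat : Int) := by omega
    rw [hm]; exact pv_odds_nat (m - 1).toNat

-- A reduces to the concatenation of the two stepped ranges
theorem pv_A (n : Int) :
    generate_worst_case n
      = PySem.List.pyRange 1 (n + 1) 2 ++ PySem.List.pyRange 2 (n + 1) 2 := by
  unfold generate_worst_case
  rw [PySem.List.foldl_append_if_eq_filter,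
      PySem.List.foldl_append_eq_flatMap (g := fun x => [x]), pv_odds]
  simp

-- B reduces to the same concatenation
theorem pv_B (n : Int) :
    generate_worst_case_alt n
      = PySem.List.pyRange 1 (n + 1) 2 ++ PySem.List.pyRange 2 (n + 1) 2 := by
  unfold generate_worst_case_alt
  by_cases hn : n ≤ 0
  · rw [PySem.List.pyRange_one_eq_nil hn,
        PySem.List.pyRange_of_pos 1 (n + 1) (by norm_num),
        PySem.List.pyRange_of_pos 2 (n + 1) (by norm_num)]
    have h1 : ¬ (1:Int) < n + 1 := by omega
    have h2 : ¬ (2:Int) < n + 1 := by omega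
    simp [h1, h2]
  · have hn : 0 < n := by omega
    have hh : PySem.Int.floordiv (n + 1) 2 = (n + 1) / 2 :=
      PySem.Int.floordiv_eq_ediv_of_pos (by norm_num)
    set h : Int := (n + 1) / 2 with hhdef
    have h0 : 0 ≤ h := by omega
    have h1 : h ≤ n := by omega
    simp only [hh]
    rw [PySem.List.pyRange_one_append 0 h n h0 h1, List.map_append]
    congr 1
    · rw [PySem.List.pyRange_one 0 h,
          PySem.List.pyRange_of_pos 1 (n + 1) (by norm_num)]
      have hc : (if (1:Int) < n + 1 then ((n + 1 - 1 + 2 - 1) / 2).toNat else 0) = h.toNat := by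
        split_ifs <;> omega
      rw [hc, show (h - 0).toNat = h.toNat from by omega, List.map_map]
      apply List.map_congr_left
      intro k hk
      simp only [List.mem_range] at hk
      have hk' : (0:Int) + (k : Int) < h := by omega
      simp only [Function.comp]
      rw [if_pos hk']
      omega
    · rw [PySem.List.pyRange_one h n,
          PySem.List.pyRange_of_pos 2 (n + 1) (by norm_num)]
      have hc : (if (2:Int) < n + 1 then ((n + 1 - 2 + 2 - 1) / 2).toNat else 0)
          = (n - h).toNat := by
        split_ifs <;> omega
      rw [hc, List.map_map]
      apply List.map_congr_left
      intro k hk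
      simp only [List.mem_range] at hk
      have hk' : ¬ h + (k : Int) < h := by omega
      simp only [Function.comp]
      rw [if_neg hk']
      omega

-- ===== VERDICT (by name: the statement is the Claim_ definition above) =====
theorem generate_worst_case_spec : Claim_equal_generate_worst_case := by
  intro n _
  unfold Spec_generate_worst_case
  rw [pv_A, pv_B]
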